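-- pv_equiv track=rewrite | github.com/remyoudompheng/nefelis | nefelis/factor/sqrt_arb.py | signs
-- ===== SOURCE A (Python) =====
-- def signs(reals, cplxs):
--     """
--     Iterate over sign combinations of square roots
--     """
--     k = len(reals) + len(cplxs) - 1
--     for sgn in range(2**k):
--         if reals:
--             rsigns = [reals[0]]
--             csigns = []
--             for i in range(k):
--                 if i < len(reals) - 1:
--                     if sgn & (1 << i):
--                         rsigns.append(-reals[i + 1])
--                     else:
--                         rsigns.append(reals[i + 1])
--                 else:
--                     j = i - len(reals) + 1
--                     if sgn & (1 << i):
--                         csigns.append(-cplxs[j])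
--                     else:
--                         csigns.append(cplxs[j])
--         else:
--             rsigns = []
--             csigns = [cplxs[0]]
--             for i in range(k):
--                 if sgn & (1 << i):
--                     csigns.append(-cplxs[i + 1])
--                 else:
--                     csigns.append(cplxs[i + 1])
--         yield rsigns, csigns
-- ===== SOURCE B (Python) =====
-- def signs(reals, cplxs):
--     """
--     Iterate over sign combinations of square roots
--     """
--     if reals:
--         head, flips, nr = reals[0], reals[1:] + cplxs, len(reals) - 1
--     else:
--         head, flips, nr = cplxs[0], cplxs[1:], 0
--
--     def vecs(vals):
--         if not vals:
--             yield []
--             return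
--         x = vals[0]
--         for rest in vecs(vals[1:]):
--             yield [x] + rest
--             yield [-x] + rest
--
--     for v in vecs(flips):
--         if reals:
--             yield [head] + v[:nr], v[nr:]
--         else:
--             yield [], [head] + v
-- ===== Notes on version B (the rewrite author's own statement) =====
-- stated objective: alternative
-- what changed: Replaces the range(2**k) bitmask loop with an inner per-bit index loop by a recursive generator that builds sign vectors over the flat list of flippable values (first value toggling fastest) and then splits each vector into the reals/cplxs parts.
import Mathlib
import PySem

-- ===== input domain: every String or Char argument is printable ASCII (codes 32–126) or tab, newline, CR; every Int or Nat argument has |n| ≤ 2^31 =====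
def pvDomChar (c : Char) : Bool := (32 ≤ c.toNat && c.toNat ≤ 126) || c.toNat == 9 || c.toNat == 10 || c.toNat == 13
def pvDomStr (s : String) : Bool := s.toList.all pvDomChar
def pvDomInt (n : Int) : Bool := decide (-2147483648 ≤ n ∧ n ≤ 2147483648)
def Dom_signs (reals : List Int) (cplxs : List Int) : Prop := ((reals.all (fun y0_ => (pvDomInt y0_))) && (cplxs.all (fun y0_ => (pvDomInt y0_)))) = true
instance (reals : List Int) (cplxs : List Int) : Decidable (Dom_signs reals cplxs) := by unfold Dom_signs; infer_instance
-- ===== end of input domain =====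

-- B replaces A's bitmask double loop by a recursive sign-vector generator over the flat list of
-- flippable values (alternative decomposition; both are Python generators, ported as the list of yields).

-- ===== PORT A =====
-- literal port of A: for sgn in range(2**k), build rsigns/csigns by an inner loop over range(k);
-- 'sgn & (1 << i) != 0' is Nat.testBit sgn i; all indices are in range under Pre_, so getD is exact there.
def signs (reals : List Int) (cplxs : List Int) : List (List Int × List Int) :=
  let k := reals.length + cplxs.length - 1
  (List.range (2 ^ k)).map (fun sgn =>
    if reals.length ≠ 0 then
      (List.range k).foldl (fun (st : List Int × List Int) i =>
          if i + 1 < reals.length then          -- Python: i < len(reals) - 1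
            if sgn.testBit i then (st.1 ++ [-(reals.getD (i + 1) 0)], st.2)
            else (st.1 ++ [reals.getD (i + 1) 0], st.2)
          else
            let j := i + 1 - reals.length       -- Python: j = i - len(reals) + 1
            if sgn.testBit i then (st.1, st.2 ++ [-(cplxs.getD j 0)])
            else (st.1, st.2 ++ [cplxs.getD j 0]))
        ([reals.headD 0], [])
    else
      (List.range k).foldl (fun (st : List Int × List Int) i =>
          if sgn.testBit i then (st.1, st.2 ++ [-(cplxs.getD (i + 1) 0)])
          else (st.1, st.2 ++ [cplxs.getD (i + 1) 0]))
        ([], [cplxs.headD 0]))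

-- ===== PORT B =====
-- port of Source B's recursive generator 'vecs': the first flippable value toggles fastest
def vecsB : List Int → List (List Int)
  | [] => [[]]
  | x :: rest => (vecsB rest).flatMap (fun v => [x :: v, (-x) :: v])

def signs_alt (reals : List Int) (cplxs : List Int) : List (List Int × List Int) :=
  match reals with
  | r :: rs =>
      let nr := rs.length
      (vecsB (rs ++ cplxs)).map (fun v => (r :: v.take nr, v.drop nr))
  | [] =>
      match cplxs with
      | c :: cs => (vecsB cs).map (fun v => (([] : List Int), c :: v))
      | [] => []   -- Source B raises IndexError here (outside Pre_)

-- ===== PRECONDITION & SPEC =====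
-- Pre_ excludes only reals = cplxs = [], where A raises TypeError (range(2**(-1))) and B IndexError.
def Pre_signs (reals : List Int) (cplxs : List Int) : Prop := reals ≠ [] ∨ cplxs ≠ []
instance (reals : List Int) (cplxs : List Int) : Decidable (Pre_signs reals cplxs) := by
  unfold Pre_signs; infer_instance
def pvWitness_signs : List Int × List Int := ([2, 3], [5])

def Spec_signs (reals : List Int) (cplxs : List Int) (out : List (List Int × List Int)) : Prop := out = signs_alt reals cplxs
instance (reals : List Int) (cplxs : List Int) (out : List (List Int × List Int)) : Decidable (Spec_signs reals cplxs out) := by unfold Spec_signs; infer_instance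

-- ===== CLAIM (what is proved, stated in full; the proofs are below) =====
def Claim_equal_signs : Prop := ∀ (reals : List Int) (cplxs : List Int), Dom_signs reals cplxs → Pre_signs reals cplxs → Spec_signs reals cplxs (signs reals cplxs)

-- ===== LEMMAS AND PROOFS =====

-- apply sgn's bits as signs to a list, bit 0 acting on the head
def applySigns : Nat → List Int → List Int
  | _, [] => []
  | sgn, x :: xs => (if sgn.testBit 0 then -x else x) :: applySigns (sgn / 2) xs

theorem applySigns_eq_map (l : List Int) : ∀ sgn : Nat,
    applySigns sgn l
      = (List.range l.length).map
          (fun i => if sgn.testBit i then -(l.getD i 0) else l.getD i 0) := by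
  induction l with
  | nil => intro sgn; rfl
  | cons x xs ih =>
      intro sgn
      simp only [applySigns, List.length_cons, List.range_succ_eq_map, List.map_cons,
        List.map_map, ih (sgn / 2)]
      congr 1
      apply List.map_congr_left
      intro i _
      have h : (sgn / 2).testBit i = sgn.testBit (i + 1) := by
        simpa [Nat.add_comm] using (Nat.testBit_succ sgn i).symm
      simp [Function.comp, h]

theorem applySigns_append (as bs : List Int) : ∀ sgn : Nat,
    applySigns sgn (as ++ bs) = applySigns sgn as ++ applySigns (sgn >>> as.length) bs := by
  induction as with
  | nil => intro sgn; simp [applySigns]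
  | cons a as ih =>
      intro sgn
      have h : sgn >>> (as.length + 1) = (sgn / 2) >>> as.length := by
        simp [Nat.shiftRight_succ_inside]
      simp [applySigns, ih (sgn / 2), h]

theorem range_double (m : Nat) (f : Nat → List Int) :
    (List.range m).flatMap (fun t => [f (2 * t), f (2 * t + 1)]) = (List.range (2 * m)).map f := by
  induction m with
  | zero => rfl
  | succ n ihn =>
      have h : 2 * (n + 1) = (2 * n) + 1 + 1 := by ring
      simp [List.range_succ, ihn, h, List.map_append, List.flatMap_append]

theorem vecsB_eq (l : List Int) :
    vecsB l = (List.range (2 ^ l.length)).map (fun sgn => applySigns sgn l) := by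
  induction l with
  | nil => rfl
  | cons x xs ih =>
      have hpow : 2 ^ (xs.length + 1) = 2 * 2 ^ xs.length := by ring
      rw [show vecsB (x :: xs) = (vecsB xs).flatMap (fun v => [x :: v, (-x) :: v]) from rfl,
        ih, List.flatMap_map, List.length_cons, hpow,
        ← range_double (2 ^ xs.length) (fun sgn => applySigns sgn (x :: xs))]
      apply List.flatMap_congr
      intro t _
      have h0 : (2 * t).testBit 0 = false := by
        simp [Nat.testBit_zero, Nat.mul_mod_right]
      have h1 : (2 * t + 1).testBit 0 = true := by
        simp [Nat.testBit_zero]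
      have d0 : 2 * t / 2 = t := by omega
      have d1 : (2 * t + 1) / 2 = t := by omega
      simp [applySigns, h0, h1, d0, d1]

theorem fold_fst (f : Nat → Int) : ∀ (l : List Nat) (a b : List Int),
    l.foldl (fun (st : List Int × List Int) i => (st.1 ++ [f i], st.2)) (a, b)
      = (a ++ l.map f, b) := by
  intro l
  induction l with
  | nil => intro a b; simp
  | cons x xs ih => intro a b; simp [ih]

theorem fold_snd (f : Nat → Int) : ∀ (l : List Nat) (a b : List Int),
    l.foldl (fun (st : List Int × List Int) i => (st.1, st.2 ++ [f i])) (a, b)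
      = (a, b ++ l.map f) := by
  intro l
  induction l with
  | nil => intro a b; simp
  | cons x xs ih => intro a b; simp [ih]

-- ===== VERDICT =====
theorem signs_spec : Claim_equal_signs := by
  intro reals cplxs _ hpre
  unfold Spec_signs
  match reals, cplxs with
  | [], [] => exact absurd hpre (by simp [Pre_signs])
  | [], c :: cs =>
      unfold signs signs_alt
      simp only [List.length_nil, List.length_cons, ne_eq]
      rw [show (0 + (cs.length + 1) - 1) = cs.length by omega, vecsB_eq, List.map_map]
      apply List.map_congr_left
      intro sgn _
      have hstep :
          (List.range cs.length).foldl (fun (st : List Int × List Int) i =>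
              if sgn.testBit i then (st.1, st.2 ++ [-((c :: cs).getD (i + 1) 0)])
              else (st.1, st.2 ++ [(c :: cs).getD (i + 1) 0])) ([], [c])
            = (List.range cs.length).foldl (fun (st : List Int × List Int) i =>
                (st.1, st.2 ++ [if sgn.testBit i then -(cs.getD i 0) else cs.getD i 0])) ([], [c]) := by
        apply PySem.List.foldl_congr_mem
        intro st i _
        by_cases h : sgn.testBit i <;> simp [h]
      rw [if_neg (by simp)]
      simp only [List.headD_cons]
      rw [hstep, fold_snd]
      simp [Function.comp, applySigns_eq_map]
  | r :: rs, cplxs =>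
      unfold signs signs_alt
      simp only [List.length_cons, ne_eq]
      rw [show (rs.length + 1 + cplxs.length - 1) = rs.length + cplxs.length by omega,
        show (2 : Nat) ^ (rs.length + cplxs.length) = 2 ^ (rs ++ cplxs).length by simp,
        vecsB_eq, List.map_map]
      apply List.map_congr_left
      intro sgn _
      simp only [Function.comp, if_pos (by omega : rs.length + 1 ≠ 0), List.headD_cons]
      -- split the inner loop at nr = rs.length
      rw [show rs.length + cplxs.length = (rs ++ cplxs).length by simp] at *
      rw [show (rs ++ cplxs).length = rs.length + cplxs.length by simp,
        List.range_add, List.foldl_append]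
      -- first segment: appends to rsigns only
      have h1 :
          (List.range rs.length).foldl (fun (st : List Int × List Int) i =>
              if i + 1 < rs.length + 1 then
                if sgn.testBit i then (st.1 ++ [-((r :: rs).getD (i + 1) 0)], st.2)
                else (st.1 ++ [(r :: rs).getD (i + 1) 0], st.2)
              else
                if sgn.testBit i then (st.1, st.2 ++ [-(cplxs.getD (i + 1 - (rs.length + 1)) 0)])
                else (st.1, st.2 ++ [cplxs.getD (i + 1 - (rs.length + 1)) 0])) ([r], [])
            = ([r] ++ (List.range rs.length).map
                (fun i => if sgn.testBit i then -(rs.getD i 0) else rs.getD i 0), []) := by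
        rw [PySem.List.foldl_congr_mem (g := fun (st : List Int × List Int) i =>
            (st.1 ++ [if sgn.testBit i then -(rs.getD i 0) else rs.getD i 0], st.2))]
        · exact fold_fst _ _ _ _
        · intro st i hi
          have hilt : i < rs.length := List.mem_range.mp hi
          rw [if_pos (by omega)]
          by_cases h : sgn.testBit i <;> simp [h]
      rw [h1]
      -- second segment: appends to csigns only
      have h2 :
          ((List.range cplxs.length).map (fun t => rs.length + t)).foldl
              (fun (st : List Int × List Int) i =>
                if i + 1 < rs.length + 1 then
                  if sgn.testBit i then (st.1 ++ [-((r :: rs).getD (i + 1) 0)], st.2)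
                  else (st.1 ++ [(r :: rs).getD (i + 1) 0], st.2)
                else
                  if sgn.testBit i then (st.1, st.2 ++ [-(cplxs.getD (i + 1 - (rs.length + 1)) 0)])
                  else (st.1, st.2 ++ [cplxs.getD (i + 1 - (rs.length + 1)) 0]))
              ([r] ++ (List.range rs.length).map
                (fun i => if sgn.testBit i then -(rs.getD i 0) else rs.getD i 0), [])
            = ([r] ++ (List.range rs.length).map
                (fun i => if sgn.testBit i then -(rs.getD i 0) else rs.getD i 0),
               [] ++ ((List.range cplxs.length).map (fun t => rs.length + t)).map
                (fun i => if sgn.testBit i then -(cplxs.getD (i - rs.length) 0)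
                          else cplxs.getD (i - rs.length) 0)) := by
        rw [PySem.List.foldl_congr_mem (g := fun (st : List Int × List Int) i =>
            (st.1, st.2 ++ [if sgn.testBit i then -(cplxs.getD (i - rs.length) 0)
                            else cplxs.getD (i - rs.length) 0]))]
        · exact fold_snd _ _ _ _
        · intro st i hi
          obtain ⟨t, _, rfl⟩ := List.mem_map.mp hi
          rw [if_neg (by omega)]
          have hj : rs.length + t + 1 - (rs.length + 1) = rs.length + t - rs.length := by
            omega
          by_cases h : sgn.testBit (rs.length + t) <;> simp [h, hj]
      rw [h2]
      -- now compare with B's value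
      rw [applySigns_append]
      have hlen : (applySigns sgn rs).length = rs.length := by
        rw [applySigns_eq_map]; simp
      rw [List.take_left' hlen, List.drop_left' hlen]
      refine Prod.ext ?_ ?_
      · simp [applySigns_eq_map]
      · simp only [List.nil_append, List.map_map]
        rw [applySigns_eq_map]
        apply List.map_congr_left
        intro t ht
        have hb : (sgn >>> rs.length).testBit t = sgn.testBit (rs.length + t) :=
          Nat.testBit_shiftRight ..
        have : rs.length + t - rs.length = t := by omega
        simp [Function.comp, hb, this]
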